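-- pv_equiv track=rewrite | github.com/ncriver/geomancy | geomancy/stringfuncs.py | merge_strings
-- ===== SOURCE A (Python) =====
-- def merge_strings(first, second, between_char = ''):
--     """Merges the lines of two string inputs into single lines in left-right order."""
--     first_lines = first.split('\n')
--     second_lines = second.split('\n')
--     zipped_lines = zip(first_lines, second_lines)
--     merged_lines = []
--     for i in zipped_lines:
--         merged_lines.append(between_char.join(i))
--
--     # If it turns out the two input strings have different number of lines,
--     # we will add the extra lines to the result.
--     min_len = min(len(first_lines), len(second_lines))
--     if len(first_lines) > len(second_lines):
--         merged_lines.extend(first_lines[min_len:])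
--     else:
--         merged_lines.extend(second_lines[min_len:])
--     return '\n'.join(merged_lines)
-- ===== SOURCE B (Python) =====
-- def merge_strings(first, second, between_char=''):
--     """Merges the lines of two string inputs into single lines in left-right order."""
--     def merge(fl, sl):
--         # structural recursion: either list's leftover is returned wholesale by a base case
--         if not fl:
--             return sl
--         if not sl:
--             return fl
--         return [fl[0] + between_char + sl[0]] + merge(fl[1:], sl[1:])
--     return '\n'.join(merge(first.split('\n'), second.split('\n')))
-- ===== Notes on version B (the rewrite author's own statement) =====
-- stated objective: alternative
-- what changed: Replaces A's staged zip/join pass followed by a length-comparison-and-slice extend phase with one structural recursion over the two line lists whose base cases return the leftover lines, using no lengths, min, zip or slicing.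
import Mathlib
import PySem

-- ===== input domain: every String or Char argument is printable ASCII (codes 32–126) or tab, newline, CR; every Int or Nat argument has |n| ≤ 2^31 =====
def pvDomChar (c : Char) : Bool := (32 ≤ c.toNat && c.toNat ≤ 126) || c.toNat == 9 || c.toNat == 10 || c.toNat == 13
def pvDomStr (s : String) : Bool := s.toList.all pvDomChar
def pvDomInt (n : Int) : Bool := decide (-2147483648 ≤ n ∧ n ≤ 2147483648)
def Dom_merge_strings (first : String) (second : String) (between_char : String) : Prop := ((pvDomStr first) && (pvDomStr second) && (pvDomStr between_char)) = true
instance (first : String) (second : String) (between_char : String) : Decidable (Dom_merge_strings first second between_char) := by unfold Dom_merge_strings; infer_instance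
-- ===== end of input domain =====

-- B replaces A's zip/join pass plus length-compare-and-slice extend phase by one structural
-- recursion over the two line lists whose base cases return the leftover lines (objective: alternative).
-- Both ports work on strings as lists of code points (PySem.Chars.splitOn/join, exact for '\n'-splitting/joining).

-- ===== PORT A =====
def merge_strings (first : String) (second : String) (between_char : String) : String :=
  let first_lines := PySem.Chars.splitOn first.toList ['\n']
  let second_lines := PySem.Chars.splitOn second.toList ['\n']
  let zipped_lines := List.zip first_lines second_lines
  let merged_lines := zipped_lines.foldl
    (fun acc i => acc ++ [PySem.Chars.join between_char.toList [i.1, i.2]]) []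
  let min_len := min first_lines.length second_lines.length
  let merged_lines :=
    if second_lines.length < first_lines.length then
      merged_lines ++ first_lines.drop min_len
    else
      merged_lines ++ second_lines.drop min_len
  String.ofList (PySem.Chars.join ['\n'] merged_lines)

-- ===== PORT B =====
-- the inner recursive helper 'merge' of Source B
def mergeRec (c : List Char) : List (List Char) → List (List Char) → List (List Char)
  | [], sl => sl
  | fl, [] => fl
  | f :: fs, s :: ss => (f ++ c ++ s) :: mergeRec c fs ss

def merge_strings_alt (first : String) (second : String) (between_char : String) : String :=
  String.ofList (PySem.Chars.join ['\n']
    (mergeRec between_char.toList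
      (PySem.Chars.splitOn first.toList ['\n'])
      (PySem.Chars.splitOn second.toList ['\n'])))

-- ===== PRECONDITION & SPEC =====
def Spec_merge_strings (first : String) (second : String) (between_char : String) (out : String) : Prop := out = merge_strings_alt first second between_char
instance (first : String) (second : String) (between_char : String) (out : String) : Decidable (Spec_merge_strings first second between_char out) := by unfold Spec_merge_strings; infer_instance

-- ===== CLAIM (what is proved, stated in full; the proofs are below) =====
def Claim_equal_merge_strings : Prop := ∀ (first : String) (second : String) (between_char : String), Dom_merge_strings first second between_char → Spec_merge_strings first second between_char (merge_strings first second between_char)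

-- ===== LEMMAS AND PROOFS =====

-- a foldl that only appends one element per step is a map
lemma foldl_snoc {α β : Type} (g : α → β) (l : List α) (init : List β) :
    l.foldl (fun acc x => acc ++ [g x]) init = init ++ l.map g := by
  induction l generalizing init with
  | nil => simp
  | cons x xs ih => simp [ih]

-- between_char.join on a two-element tuple is plain concatenation
lemma join_pair (c a b : List Char) : PySem.Chars.join c [a, b] = a ++ c ++ b := by
  simp [PySem.Chars.join_cons_cons, PySem.Chars.join_singleton, List.append_assoc]

-- A's merged-line list equals B's recursive merge
lemma core (c : List Char) (fl sl : List (List Char)) :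
    (if sl.length < fl.length then
       (fl.zip sl).map (fun i => i.1 ++ c ++ i.2) ++ fl.drop (min fl.length sl.length)
     else
       (fl.zip sl).map (fun i => i.1 ++ c ++ i.2) ++ sl.drop (min fl.length sl.length)) =
    mergeRec c fl sl := by
  induction fl generalizing sl with
  | nil => cases sl <;> simp [mergeRec]
  | cons f fs ih =>
    cases sl with
    | nil => simp [mergeRec]
    | cons s ss =>
      have ih' := ih ss
      simp only [mergeRec, List.zip_cons_cons, List.map_cons, List.length_cons, List.cons_append]
      have hmin : min (fs.length + 1) (ss.length + 1) = min fs.length ss.length + 1 := by omega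
      by_cases h : ss.length < fs.length
      · rw [if_pos (by omega : ss.length + 1 < fs.length + 1), hmin, List.drop_succ_cons]
        rw [if_pos h] at ih'; rw [ih']
      · rw [if_neg (by omega : ¬ ss.length + 1 < fs.length + 1), hmin, List.drop_succ_cons]
        rw [if_neg h] at ih'; rw [ih']

-- ===== VERDICT (by name: the statement is the Claim_ definition above) =====
theorem merge_strings_spec : Claim_equal_merge_strings := by
  intro first second between_char _
  show merge_strings first second between_char = merge_strings_alt first second between_char
  simp only [merge_strings, merge_strings_alt]
  rw [foldl_snoc]
  simp only [List.nil_append]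
  have hj : (fun i : List Char × List Char => PySem.Chars.join between_char.toList [i.1, i.2])
      = fun i => i.1 ++ between_char.toList ++ i.2 := by
    funext i; exact join_pair _ _ _
  rw [hj, core]
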